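-- pv_equiv track=rewrite | github.com/m3xw3ll/LeetCode | Algorithms/snippets/2057_smallest_index_with_equal_value.py | smallest_equal
-- ===== SOURCE A (Python) =====
-- def smallest_equal(nums):
--     indicies = []
--     for idx, num in enumerate(nums):
--         if idx % 10 == num:
--             indicies.append(idx)
--     if indicies:
--         return min(indicies)
--     else:
--         return -1
-- ===== SOURCE B (Python) =====
-- def smallest_equal(nums):
--     for idx, num in enumerate(nums):
--         if idx % 10 == num:
--             return idx
--     return -1
-- ===== Notes on version B (the rewrite author's own statement) =====
-- stated objective: simpler
-- what changed: B returns the first index with idx % 10 == num directly (early exit), instead of collecting all matching indices into a list and taking min() over it.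
import Mathlib
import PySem

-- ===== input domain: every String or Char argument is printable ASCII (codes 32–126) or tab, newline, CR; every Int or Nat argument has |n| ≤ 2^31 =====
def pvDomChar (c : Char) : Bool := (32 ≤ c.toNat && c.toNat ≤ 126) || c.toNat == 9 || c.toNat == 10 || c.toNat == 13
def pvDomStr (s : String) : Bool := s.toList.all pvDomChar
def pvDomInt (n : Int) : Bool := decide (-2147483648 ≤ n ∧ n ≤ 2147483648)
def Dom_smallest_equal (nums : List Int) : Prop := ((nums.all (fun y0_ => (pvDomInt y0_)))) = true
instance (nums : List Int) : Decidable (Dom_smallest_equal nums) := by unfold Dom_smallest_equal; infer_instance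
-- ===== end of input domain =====

-- B replaces A's collect-all-matches-then-min() with a single early-exit scan returning the first match (simpler).

-- ===== PORT A =====
-- the loop: append idx to indicies whenever idx % 10 == num
def smallest_equal_loop (indicies : List Int) (pairs : List (Int × Int)) : List Int :=
  pairs.foldl (fun acc p => if PySem.Int.mod p.1 10 = p.2 then acc ++ [p.1] else acc) indicies

def smallest_equal (nums : List Int) : Int :=
  let indicies := smallest_equal_loop [] (PySem.List.enumerate nums)
  if indicies ≠ [] then
    match PySem.List.min? indicies (fun x => x) with
    | some m => m
    | none => -1
  else -1

-- ===== PORT B =====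
-- early-exit scan: return the first idx with idx % 10 == num, else -1
def smallest_equal_alt_go (nums : List Int) (idx : Int) : Int :=
  match nums with
  | [] => -1
  | num :: rest => if PySem.Int.mod idx 10 = num then idx else smallest_equal_alt_go rest (idx + 1)

def smallest_equal_alt (nums : List Int) : Int :=
  smallest_equal_alt_go nums 0

-- ===== PRECONDITION & SPEC =====
def Spec_smallest_equal (nums : List Int) (out : Int) : Prop := out = smallest_equal_alt nums
instance (nums : List Int) (out : Int) : Decidable (Spec_smallest_equal nums out) := by unfold Spec_smallest_equal; infer_instance

-- ===== CLAIM (what is proved, stated in full; the proofs are below) =====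
def Claim_equal_smallest_equal : Prop := ∀ (nums : List Int), Dom_smallest_equal nums → Spec_smallest_equal nums (smallest_equal nums)

-- ===== LEMMAS AND PROOFS =====

-- the list A's loop builds, described structurally
def collectMatches (nums : List Int) (s : Int) : List Int :=
  match nums with
  | [] => []
  | num :: rest =>
    (if PySem.Int.mod s 10 = num then [s] else []) ++ collectMatches rest (s + 1)

theorem smallest_equal_loop_eq (nums : List Int) (s : Int) (acc : List Int) :
    smallest_equal_loop acc (PySem.List.enumerate nums s) = acc ++ collectMatches nums s := by
  induction nums generalizing s acc with
  | nil => simp [smallest_equal_loop, collectMatches, PySem.List.enumerate_nil]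
  | cons x xs ih =>
    simp only [PySem.List.enumerate_cons, collectMatches, smallest_equal_loop, List.foldl_cons]
    rw [← smallest_equal_loop, ih]
    split <;> simp

theorem collectMatches_ge (nums : List Int) (s : Int) :
    ∀ y ∈ collectMatches nums s, s ≤ y := by
  induction nums generalizing s with
  | nil => simp [collectMatches]
  | cons x xs ih =>
    intro y hy
    simp only [collectMatches, List.mem_append] at hy
    rcases hy with hy | hy
    · split at hy <;> simp_all
    · have := ih (s + 1) y hy; omega

theorem min_collect_eq_go (nums : List Int) (s : Int) :
    (match PySem.List.min? (collectMatches nums s) (fun x => x) with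
      | some m => m | none => (-1 : Int)) = smallest_equal_alt_go nums s := by
  induction nums generalizing s with
  | nil => simp [collectMatches, smallest_equal_alt_go, PySem.List.min?]
  | cons x xs ih =>
    by_cases h : PySem.Int.mod s 10 = x
    · have hcons : collectMatches (x :: xs) s = s :: collectMatches xs (s + 1) := by
        show (if PySem.Int.mod s 10 = x then [s] else []) ++ collectMatches xs (s + 1) = _
        rw [if_pos h]; rfl
      have hgo : smallest_equal_alt_go (x :: xs) s = s := by
        show (if PySem.Int.mod s 10 = x then s else smallest_equal_alt_go xs (s + 1)) = s
        rw [if_pos h]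
      rw [hcons, hgo]
      rcases hm : PySem.List.min? (s :: collectMatches xs (s + 1)) (fun x => x) with _ | m
      · exact absurd ((PySem.List.min?_eq_none_iff _ _).mp hm) (by simp)
      · have hmem := PySem.List.min?_mem hm
        have hmin := PySem.List.min?_isMin hm s (by simp)
        simp only [List.mem_cons] at hmem
        simp only []
        rcases hmem with rfl | hmem
        · rfl
        · have := collectMatches_ge xs (s + 1) m hmem
          omega
    · have hcons : collectMatches (x :: xs) s = collectMatches xs (s + 1) := by
        show (if PySem.Int.mod s 10 = x then [s] else []) ++ collectMatches xs (s + 1) = _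
        rw [if_neg h]; exact List.nil_append _
      have hgo : smallest_equal_alt_go (x :: xs) s = smallest_equal_alt_go xs (s + 1) := by
        show (if PySem.Int.mod s 10 = x then s else smallest_equal_alt_go xs (s + 1)) = _
        rw [if_neg h]
      rw [hcons, hgo, ih]

-- ===== VERDICT (by name: the statement is the Claim_ definition above) =====
theorem smallest_equal_spec : Claim_equal_smallest_equal := by
  intro nums _
  show smallest_equal nums = smallest_equal_alt nums
  unfold smallest_equal smallest_equal_alt
  rw [smallest_equal_loop_eq nums 0 []]
  simp only [List.nil_append]
  have hmc := min_collect_eq_go nums 0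
  by_cases h : collectMatches nums 0 = []
  · rw [h] at hmc ⊢
    simp only [ne_eq, not_true_eq_false, if_false]
    simpa [PySem.List.min?] using hmc
  · rw [if_pos h]
    exact hmc
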